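-- pv_equiv track=rewrite | github.com/ganesh44we/RV-search-engine | redis_search_engine/text.py | contains_proximity
-- ===== SOURCE A (Python) =====
-- def contains_proximity(tokens: list[str], terms: list[str], distance: int) -> bool:
--     if not terms or len(terms) == 1:
--         return bool(terms and terms[0] in tokens)
--
--     positions: list[list[int]] = []
--     for term in terms:
--         hits = [index for index, token in enumerate(tokens) if token == term]
--         if not hits:
--             return False
--         positions.append(hits)
--
--     min_pos = min(position_list[0] for position_list in positions)
--     max_pos = max(position_list[-1] for position_list in positions)
--     if max_pos - min_pos <= distance:
--         return True
--
--     for start in positions[0]: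
--         current_min = start
--         current_max = start
--         valid = True
--         for next_positions in positions[1:]:
--             candidate = min(next_positions, key=lambda pos: abs(pos - current_max))
--             current_min = min(current_min, candidate)
--             current_max = max(current_max, candidate)
--             if current_max - current_min > distance:
--                 valid = False
--                 break
--         if valid:
--             return True
--     return False
-- ===== SOURCE B (Python) =====
-- def _nearest(hits, x):
--     # leftmost position in sorted `hits` minimizing abs(pos - x) (ties -> smaller),
--     # via binary search instead of a linear scan
--     lo, hi = 0, len(hits)
--     while lo < hi:
--         mid = (lo + hi) // 2
--         if hits[mid] < x:
--             lo = mid + 1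
--         else:
--             hi = mid
--     if lo == 0:
--         return hits[0]
--     if lo == len(hits):
--         return hits[-1]
--     left, right = hits[lo - 1], hits[lo]
--     return left if x - left <= right - x else right
--
--
-- def contains_proximity(tokens: list[str], terms: list[str], distance: int) -> bool:
--     index: dict[str, list[int]] = {}
--     for i, tok in enumerate(tokens):
--         index.setdefault(tok, []).append(i)
--
--     if not terms:
--         return False
--     if len(terms) == 1:
--         return terms[0] in index
--
--     plists = [index.get(term, []) for term in terms]
--     if any(not hits for hits in plists):
--         return False
--
--     # The window [lo, hi] only grows, so one final width test per start replaces
--     # A's per-step validity flag/break, and A's separate global min/max pre-pass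
--     # is redundant (when it fires, every start's walk stays inside that span).
--     first, rest = plists[0], plists[1:]
--     for s in first:
--         lo = hi = s
--         for hits in rest:
--             c = _nearest(hits, hi)
--             if c < lo:
--                 lo = c
--             elif c > hi:
--                 hi = c
--         if hi - lo <= distance:
--             return True
--     return False
-- ===== Notes on version B (the rewrite author's own statement) =====
-- stated objective: faster
-- what changed: B replaces A's per-term scans of tokens with one grouping pass building a token->positions index, replaces the linear min(key=abs) scan by a hand-rolled binary search for the nearest position, and drops both A's global min/max pre-pass (when it fires every start's walk already stays inside that span) and A's per-step validity flag/break (the window only grows, so one final width test per start is equivalent).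
import Mathlib
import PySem

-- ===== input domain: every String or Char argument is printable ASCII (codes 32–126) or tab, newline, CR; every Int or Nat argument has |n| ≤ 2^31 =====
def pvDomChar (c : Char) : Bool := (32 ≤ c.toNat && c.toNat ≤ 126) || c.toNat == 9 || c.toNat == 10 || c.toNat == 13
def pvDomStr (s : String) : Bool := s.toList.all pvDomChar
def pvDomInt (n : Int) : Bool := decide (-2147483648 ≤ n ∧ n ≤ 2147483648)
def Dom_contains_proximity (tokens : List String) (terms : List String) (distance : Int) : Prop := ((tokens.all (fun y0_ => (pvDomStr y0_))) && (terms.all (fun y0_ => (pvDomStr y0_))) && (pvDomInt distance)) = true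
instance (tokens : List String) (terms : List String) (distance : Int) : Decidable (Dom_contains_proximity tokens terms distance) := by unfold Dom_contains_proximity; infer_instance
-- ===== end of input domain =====

-- B builds a token->positions index in one pass, finds each nearest position by binary
-- search, and drops A's global min/max pre-pass and per-step validity flag/break (the
-- window only grows, so one final width test per start suffices); same return value as A.



-- ===== PORT A =====
-- hits for one term: [index for index, token in enumerate(tokens) if token == term]
def cpHitsA (tokens : List String) (term : String) : List Int :=
  ((PySem.List.enumerate tokens).filter (fun p => p.2 == term)).map (fun p => p.1)

-- the positions-building loop with its early 'return False' (none = returned False)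
def cpPositionsA (tokens : List String) : List String → Option (List (List Int))
  | [] => some []
  | term :: rest =>
    let hits := cpHitsA tokens term
    if hits = [] then none
    else (cpPositionsA tokens rest).map (fun ps => hits :: ps)

-- inner loop over positions[1:]: candidate = min(next_positions, key=lambda pos: abs(pos - current_max))
def cpInnerA (distance : Int) : List (List Int) → Int → Int → Bool
  | [], _, _ => true
  | nps :: rest, curMin, curMax =>
    let cand := (PySem.List.min? nps (fun pos => |pos - curMax|)).getD 0
    let curMin' := min curMin cand
    let curMax' := max curMax cand
    if curMax' - curMin' > distance then false
    else cpInnerA distance rest curMin' curMax'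

-- outer loop: for start in positions[0]
def cpOuterA (distance : Int) (rest : List (List Int)) : List Int → Bool
  | [] => false
  | start :: more =>
    if cpInnerA distance rest start start then true else cpOuterA distance rest more

def contains_proximity (tokens : List String) (terms : List String) (distance : Int) : Bool :=
  if terms = [] ∨ terms.length = 1 then
    if terms = [] then false else tokens.contains (PySem.List.pyGetD terms 0 "")
  else
    match cpPositionsA tokens terms with
    | none => false
    | some positions =>
      let minPos := (PySem.List.min? (positions.map (fun l => PySem.List.pyGetD l 0 0)) (fun v => v)).getD 0
      let maxPos := (PySem.List.max? (positions.map (fun l => PySem.List.pyGetD l (-1) 0)) (fun v => v)).getD 0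
      if maxPos - minPos ≤ distance then true
      else
        match positions with
        | [] => false
        | first :: rest => cpOuterA distance rest first

-- ===== PORT B =====
-- one-pass grouping index: for i, tok in enumerate(tokens): index.setdefault(tok, []).append(i)
def cpIndexB (tokens : List String) : PySem.Dict String (List Int) :=
  (((PySem.List.enumerate tokens).map (fun p => (p.2, p.1))).foldl
    (fun d p => d.modify p.1 [] (fun v => v ++ [p.2])) PySem.Dict.empty)

-- the hand-written bisect_left loop of _nearest
def cpSearchB (hits : List Int) (x : Int) (lo hi : Nat) : Nat :=
  if h : lo < hi then
    let mid := (lo + hi) / 2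
    if PySem.List.pyGetD hits (mid : Int) 0 < x then cpSearchB hits x (mid + 1) hi
    else cpSearchB hits x lo mid
  else lo
termination_by hi - lo
decreasing_by all_goals omega

def cpNearestB (hits : List Int) (x : Int) : Int :=
  let lo := cpSearchB hits x 0 hits.length
  if lo = 0 then PySem.List.pyGetD hits 0 0
  else if lo = hits.length then PySem.List.pyGetD hits (-1) 0
  else if x - PySem.List.pyGetD hits ((lo : Int) - 1) 0 ≤ PySem.List.pyGetD hits (lo : Int) 0 - x
  then PySem.List.pyGetD hits ((lo : Int) - 1) 0
  else PySem.List.pyGetD hits (lo : Int) 0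

-- the per-start walk: grow [lo, hi] through the remaining hit lists, no per-step check
def cpWalkB : List (List Int) → Int → Int → Int × Int
  | [], lo, hi => (lo, hi)
  | hits :: rest, lo, hi =>
    let c := cpNearestB hits hi
    if c < lo then cpWalkB rest c hi
    else if c > hi then cpWalkB rest lo c
    else cpWalkB rest lo hi

-- for s in first: ... if hi - lo <= distance: return True
def cpAnyStartB (distance : Int) (rest : List (List Int)) : List Int → Bool
  | [] => false
  | s :: more =>
    let w := cpWalkB rest s s
    if w.2 - w.1 ≤ distance then true else cpAnyStartB distance rest more

def contains_proximity_alt (tokens : List String) (terms : List String) (distance : Int) : Bool :=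
  let idx := cpIndexB tokens
  if terms = [] then false
  else if terms.length = 1 then idx.contains (PySem.List.pyGetD terms 0 "")
  else
    let plists := terms.map (fun term => idx.getD term [])
    if plists.any (fun hits => hits.isEmpty) then false
    else
      match plists with
      | [] => false
      | first :: rest => cpAnyStartB distance rest first

-- ===== PRECONDITION & SPEC =====
def Spec_contains_proximity (tokens : List String) (terms : List String) (distance : Int) (out : Bool) : Prop := out = contains_proximity_alt tokens terms distance
instance (tokens : List String) (terms : List String) (distance : Int) (out : Bool) : Decidable (Spec_contains_proximity tokens terms distance out) := by unfold Spec_contains_proximity; infer_instance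

-- ===== CLAIM (what is proved, stated in full; the proofs are below) =====
def Claim_equal_contains_proximity : Prop := ∀ (tokens : List String) (terms : List String) (distance : Int), Dom_contains_proximity tokens terms distance → Spec_contains_proximity tokens terms distance (contains_proximity tokens terms distance)

-- ===== LEMMAS AND PROOFS =====
-- the foldl step of PySem.List.min? (proof-local name)
def cpStep {α : Type} (key : α → Int) (acc : Option α) (x : α) : Option α :=
  match acc with
  | none => some x
  | some m => if key x < key m then some x else some m

lemma cpMin?_eq_foldl {α : Type} (xs : List α) (key : α → Int) :
    PySem.List.min? xs key = xs.foldl (cpStep key) none := rfl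

lemma cpFoldMin_keep {α : Type} (key : α → Int) (m : α) (suf : List α)
    (h : ∀ y ∈ suf, key m ≤ key y) :
    suf.foldl (cpStep key) (some m) = some m := by
  induction suf with
  | nil => rfl
  | cons y t ih =>
    have hy := h y (by simp)
    simp only [List.foldl_cons, cpStep, if_neg (by omega : ¬ key y < key m)]
    exact ih (fun z hz => h z (by simp [hz]))

lemma cpFoldMin_pre {α : Type} (key : α → Int) (m : α) (pre : List α)
    (h : ∀ y ∈ pre, key m < key y) :
    ∀ acc, (acc = none ∨ ∃ a, acc = some a ∧ key m < key a) →
      (pre.foldl (cpStep key) acc = none ∨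
       ∃ a, pre.foldl (cpStep key) acc = some a ∧ key m < key a) := by
  induction pre with
  | nil => intro acc hacc; simpa using hacc
  | cons y t ih =>
    intro acc hacc
    have hy := h y (by simp)
    have hrec := ih (fun z hz => h z (by simp [hz]))
    rcases hacc with h0 | ⟨a, ha, hka⟩
    · subst h0
      exact hrec (cpStep key none y) (Or.inr ⟨y, rfl, hy⟩)
    · subst ha
      refine hrec (cpStep key (some a) y) (Or.inr ?_)
      by_cases hc : key y < key a
      · exact ⟨y, by simp [cpStep, hc], hy⟩
      · exact ⟨a, by simp [cpStep, hc], hka⟩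

lemma cpMin?_split {α : Type} (key : α → Int) (pre suf : List α) (m : α)
    (hpre : ∀ y ∈ pre, key m < key y) (hsuf : ∀ y ∈ suf, key m ≤ key y) :
    PySem.List.min? (pre ++ m :: suf) key = some m := by
  rw [cpMin?_eq_foldl, List.foldl_append, List.foldl_cons]
  rcases cpFoldMin_pre key m pre hpre none (Or.inl rfl) with h0 | ⟨a, ha, hka⟩
  · rw [h0]; exact cpFoldMin_keep key m suf hsuf
  · rw [ha]
    have : cpStep key (some a) m = some m := by simp [cpStep, hka]
    rw [this]; exact cpFoldMin_keep key m suf hsuf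

lemma cpGetNat (l : List Int) (n : Nat) (h : n < l.length) :
    PySem.List.pyGetD l (n : Int) 0 = l[n] := by
  rw [PySem.List.pyGetD_natCast, List.getD_eq_getElem?_getD, List.getElem?_eq_getElem h]
  rfl

lemma cpGetNeg1 (l : List Int) (h : 0 < l.length) :
    PySem.List.pyGetD l (-1) 0 = l[l.length - 1] := by
  simp only [PySem.List.pyGetD, PySem.List.pyGet?, PySem.List.pyIdx?]
  have h1 : ¬ (0:Int) ≤ -1 := by omega
  have h2 : -(l.length : Int) ≤ -1 := by omega
  simp only [if_neg h1, if_pos h2]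
  simp [List.getElem?_eq_getElem (by omega : l.length - 1 < l.length)]

lemma cpSearchB_spec (hits : List Int) (x : Int) (hs : hits.Pairwise (· < ·)) :
    ∀ lo hi, hi ≤ hits.length → lo ≤ hi →
    lo ≤ cpSearchB hits x lo hi ∧ cpSearchB hits x lo hi ≤ hi ∧
    (∀ j (hj : j < hits.length), j < cpSearchB hits x lo hi → lo ≤ j → hits[j] < x) ∧
    (∀ j (hj : j < hits.length), cpSearchB hits x lo hi ≤ j → j < hi → x ≤ hits[j]) := by
  have hmono := List.pairwise_iff_getElem.mp hs
  intro lo hi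
  induction lo, hi using cpSearchB.induct hits x with
  | case1 lo hi h mid hcmp ih =>
    intro hhi hlo
    have hmideq : mid = (lo + hi) / 2 := rfl
    rw [cpSearchB, dif_pos h, if_pos hcmp]
    simp only [← hmideq]
    have hmid : mid < hits.length := by omega
    rw [cpGetNat hits (mid) hmid] at hcmp
    obtain ⟨h1, h2, h3, h4⟩ := ih hhi (by omega)
    refine ⟨by omega, h2, ?_, ?_⟩
    · intro j hj hjL hloj
      by_cases hjm : mid + 1 ≤ j
      · exact h3 j hj hjL hjm
      · rcases Nat.lt_or_ge j (mid) with hlt | hge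
        · exact lt_trans (hmono j (mid) hj hmid hlt) hcmp
        · have hje : j = mid := by omega
          subst hje; exact hcmp
    · intro j hj hLj hjhi; exact h4 j hj hLj hjhi
  | case2 lo hi h mid hcmp ih =>
    intro hhi hlo
    have hmideq : mid = (lo + hi) / 2 := rfl
    rw [cpSearchB, dif_pos h, if_neg hcmp]
    simp only [← hmideq]
    have hmid : mid < hits.length := by omega
    rw [cpGetNat hits (mid) hmid] at hcmp
    rw [Int.not_lt] at hcmp
    obtain ⟨h1, h2, h3, h4⟩ := ih (by omega) (by omega)
    refine ⟨h1, by omega, ?_, ?_⟩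
    · intro j hj hjL hloj; exact h3 j hj hjL hloj
    · intro j hj hLj hjhi
      by_cases hjm : j < mid
      · exact h4 j hj hLj hjm
      · rcases Nat.lt_or_ge (mid) j with hlt | hge
        · exact le_trans hcmp (le_of_lt (hmono (mid) j hmid hj hlt))
        · have hje : j = mid := by omega
          subst hje; exact hcmp
  | case3 lo hi h =>
    intro hhi hlo
    rw [cpSearchB, dif_neg h]
    exact ⟨le_refl _, by omega, by omega, by omega⟩

lemma cpAbs (a x : Int) : |a - x| = if x ≤ a then a - x else x - a := by
  split_ifs with h
  · exact abs_of_nonneg (by omega)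
  · rw [abs_of_neg (by omega)]; ring

lemma cpDropMem (hits : List Int) (m : Nat) (y : Int) (hy : y ∈ hits.drop m) :
    ∃ j, ∃ (hj : j < hits.length), m ≤ j ∧ hits[j] = y := by
  rw [List.mem_iff_getElem] at hy
  obtain ⟨i, hi, he⟩ := hy
  have hlen := hits.length_drop (i := m)
  refine ⟨m + i, by omega, by omega, ?_⟩
  rw [← he, List.getElem_drop]

lemma cpTakeMem (hits : List Int) (m : Nat) (y : Int) (hy : y ∈ hits.take m) :
    ∃ j, ∃ (hj : j < hits.length), j < m ∧ hits[j] = y := by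
  rw [List.mem_iff_getElem] at hy
  obtain ⟨i, hi, he⟩ := hy
  have hlen := hits.length_take (i := m)
  refine ⟨i, by omega, by omega, ?_⟩
  rw [← he, List.getElem_take]

lemma cpSplitAt (hits : List Int) (k : Nat) (hk : k < hits.length) :
    hits = hits.take k ++ hits[k] :: hits.drop (k + 1) := by
  conv_lhs => rw [← List.take_append_drop k hits]
  rw [← List.getElem_cons_drop hk]

lemma cpNearestB_eq (hits : List Int) (x : Int) (hne : hits ≠ [])
    (hs : hits.Pairwise (· < ·)) :
    cpNearestB hits x = (PySem.List.min? hits (fun pos => |pos - x|)).getD 0 := by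
  have hlen : 0 < hits.length := List.length_pos_iff.mpr hne
  have hmono := List.pairwise_iff_getElem.mp hs
  obtain ⟨h1, h2, h3, h4⟩ := cpSearchB_spec hits x hs 0 hits.length (le_refl _) (by omega)
  unfold cpNearestB
  set L := cpSearchB hits x 0 hits.length with hL
  by_cases hL0 : L = 0
  · rw [if_pos hL0]
    have hall : ∀ j (hj : j < hits.length), x ≤ hits[j] := by
      intro j hj; exact h4 j hj (by omega) hj
    have hget0 : PySem.List.pyGetD hits 0 0 = hits[0] := by
      have := cpGetNat hits 0 hlen; simpa using this
    rw [hget0]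
    conv_rhs => rw [cpSplitAt hits 0 hlen]
    rw [show hits.take 0 = ([] : List Int) from rfl]
    rw [cpMin?_split (fun pos => |pos - x|) [] (hits.drop (0 + 1)) (hits[0]) (by simp) ?_]
    · rfl
    · intro y hy
      obtain ⟨j, hj, hmj, he⟩ := cpDropMem hits 1 y hy
      have hx0 := hall 0 hlen
      have h0j : hits[0] ≤ hits[j] := by
        rcases Nat.eq_or_lt_of_le (Nat.zero_le j) with h | h
        · simp [← h]
        · exact le_of_lt (hmono 0 j hlen hj h)
      subst he
      have hgoal : |hits[0] - x| ≤ |hits[j] - x| := by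
        simp only [cpAbs]; split_ifs <;> omega
      exact hgoal
  · rw [if_neg hL0]
    by_cases hLlen : L = hits.length
    · rw [if_pos hLlen]
      have hall : ∀ j (hj : j < hits.length), hits[j] < x := by
        intro j hj; exact h3 j hj (by omega) (by omega)
      rw [cpGetNeg1 hits hlen]
      have hk : hits.length - 1 < hits.length := by omega
      conv_rhs => rw [cpSplitAt hits (hits.length - 1) hk]
      rw [show hits.drop (hits.length - 1 + 1) = ([] : List Int) from
        List.drop_eq_nil_of_le (by omega)]
      rw [cpMin?_split (fun pos => |pos - x|) (hits.take (hits.length - 1)) []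
        (hits[hits.length - 1]) ?_ (by simp)]
      · rfl
      · intro y hy
        obtain ⟨j, hj, hmj, he⟩ := cpTakeMem hits (hits.length - 1) y hy
        have hjlast : hits[j] < hits[hits.length - 1] := hmono j (hits.length - 1) hj hk (by omega)
        have hlx := hall (hits.length - 1) hk
        subst he
        have hgoal : |hits[hits.length - 1] - x| < |hits[j] - x| := by
          simp only [cpAbs]; split_ifs <;> omega
        exact hgoal
    · rw [if_neg hLlen]
      have hLlt : L < hits.length := by omega
      have hL1 : L - 1 < hits.length := by omega
      have hleft : PySem.List.pyGetD hits ((L : Int) - 1) 0 = hits[L - 1] := by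
        rw [show ((L : Int) - 1) = (((L - 1 : Nat)) : Int) by omega, cpGetNat hits (L - 1) hL1]
      have hright : PySem.List.pyGetD hits ((L : Int)) 0 = hits[L] := cpGetNat hits L hLlt
      rw [hleft, hright]
      have hlx : hits[L - 1] < x := h3 (L - 1) hL1 (by omega) (by omega)
      have hxr : x ≤ hits[L] := h4 L hLlt (by omega) hLlt
      by_cases hc : x - hits[L - 1] ≤ hits[L] - x
      · rw [if_pos hc]
        conv_rhs => rw [cpSplitAt hits (L - 1) hL1]
        rw [cpMin?_split (fun pos => |pos - x|) (hits.take (L - 1)) (hits.drop (L - 1 + 1))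
          (hits[L - 1]) ?_ ?_]
        · rfl
        · intro y hy
          obtain ⟨j, hj, hmj, he⟩ := cpTakeMem hits (L - 1) y hy
          have hjl : hits[j] < hits[L - 1] := hmono j (L - 1) hj hL1 (by omega)
          subst he
          have hgoal : |hits[L - 1] - x| < |hits[j] - x| := by
            simp only [cpAbs]; split_ifs <;> omega
          exact hgoal
        · intro y hy
          obtain ⟨j, hj, hmj, he⟩ := cpDropMem hits (L - 1 + 1) y hy
          have hra : hits[L] ≤ hits[j] := by
            rcases Nat.eq_or_lt_of_le (by omega : L ≤ j) with h | h
            · simp [← h]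
            · exact le_of_lt (hmono L j hLlt hj h)
          subst he
          have hgoal : |hits[L - 1] - x| ≤ |hits[j] - x| := by
            simp only [cpAbs]; split_ifs <;> omega
          exact hgoal
      · rw [if_neg hc]
        conv_rhs => rw [cpSplitAt hits L hLlt]
        rw [cpMin?_split (fun pos => |pos - x|) (hits.take L) (hits.drop (L + 1))
          (hits[L]) ?_ ?_]
        · rfl
        · intro y hy
          obtain ⟨j, hj, hmj, he⟩ := cpTakeMem hits L y hy
          have hyl : hits[j] ≤ hits[L - 1] := by
            rcases Nat.eq_or_lt_of_le (by omega : j ≤ L - 1) with h | h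
            · simp [h]
            · exact le_of_lt (hmono j (L - 1) hj hL1 h)
          subst he
          have hgoal : |hits[L] - x| < |hits[j] - x| := by
            simp only [cpAbs]; split_ifs <;> omega
          exact hgoal
        · intro y hy
          obtain ⟨j, hj, hmj, he⟩ := cpDropMem hits (L + 1) y hy
          have hlj : hits[L] < hits[j] := hmono L j hLlt hj (by omega)
          subst he
          have hgoal : |hits[L] - x| ≤ |hits[j] - x| := by
            simp only [cpAbs]; split_ifs <;> omega
          exact hgoal

lemma cpHitsA_pairwise (tokens : List String) (term : String) :
    (cpHitsA tokens term).Pairwise (· < ·) := by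
  unfold cpHitsA
  rw [List.pairwise_map]
  exact (PySem.List.pairwise_lt_enumerate tokens 0).filter _

lemma cpIndexB_getD (tokens : List String) (term : String) :
    (cpIndexB tokens).getD term [] = cpHitsA tokens term := by
  unfold cpIndexB cpHitsA
  rw [PySem.Dict.getD_foldl_modify_append]
  rw [List.filter_map, List.map_map]
  rfl

lemma cpIndexB_contains (tokens : List String) (t : String) :
    (cpIndexB tokens).contains t = tokens.contains t := by
  unfold cpIndexB
  rw [PySem.Dict.contains_eq_decide_mem_keys, PySem.Dict.keys_foldl_modify_key]
  simp [PySem.Set.mem_update, List.map_map, Function.comp]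
  constructor
  · rintro ⟨a, ha⟩
    obtain ⟨k, hk, he⟩ := (PySem.List.mem_enumerate_iff tokens 0 (a, t)).mp ha
    have : t = tokens[k] := congrArg Prod.snd he
    rw [this]
    exact List.getElem_mem hk
  · intro ht
    obtain ⟨k, hk, he⟩ := List.mem_iff_getElem.mp ht
    exact ⟨(0 : Int) + k, (PySem.List.mem_enumerate_iff tokens 0 ((0 : Int) + k, t)).mpr ⟨k, hk, by rw [he]⟩⟩

lemma cpPositionsA_good (tokens : List String) :
    ∀ (terms : List String) (ps : List (List Int)),
      cpPositionsA tokens terms = some ps →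
      ∀ l ∈ ps, l ≠ [] ∧ l.Pairwise (· < ·) := by
  intro terms
  induction terms with
  | nil =>
    intro ps h
    simp only [cpPositionsA] at h
    cases h
    intro l hl; cases hl
  | cons term rest ih =>
    intro ps h
    by_cases hne : cpHitsA tokens term = []
    · simp [cpPositionsA, hne] at h
    · cases hrec : cpPositionsA tokens rest with
      | none => simp [cpPositionsA, hne, hrec] at h
      | some qs =>
        simp only [cpPositionsA, hrec, if_neg hne, Option.map_some, Option.some.injEq] at h
        subst h
        intro l hl
        rcases List.mem_cons.mp hl with h | h
        · subst h; exact ⟨hne, cpHitsA_pairwise tokens term⟩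
        · exact ih qs hrec l h

lemma cpNearestB_mem (hits : List Int) (x : Int) (hne : hits ≠ [])
    (hs : hits.Pairwise (· < ·)) : cpNearestB hits x ∈ hits := by
  rw [cpNearestB_eq hits x hne hs]
  cases h : PySem.List.min? hits (fun pos => |pos - x|) with
  | none => exact absurd ((PySem.List.min?_eq_none_iff _ _).mp h) hne
  | some m => simpa using PySem.List.min?_mem h

lemma cpPositionsA_none (tokens : List String) :
    ∀ (terms : List String), (∃ t ∈ terms, cpHitsA tokens t = []) →
      cpPositionsA tokens terms = none := by
  intro terms
  induction terms with
  | nil => rintro ⟨t, ht, _⟩; cases ht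
  | cons t0 trest ih =>
    rintro ⟨t, ht, hempty⟩
    rcases List.mem_cons.mp ht with h | h
    · subst h; simp [cpPositionsA, hempty]
    · by_cases h0 : cpHitsA tokens t0 = []
      · simp [cpPositionsA, h0]
      · simp [cpPositionsA, h0, ih ⟨t, h, hempty⟩]

lemma cpPositionsA_some (tokens : List String) :
    ∀ (terms : List String), (∀ t ∈ terms, cpHitsA tokens t ≠ []) →
      cpPositionsA tokens terms = some (terms.map (cpHitsA tokens)) := by
  intro terms
  induction terms with
  | nil => intro _; rfl
  | cons t0 trest ih =>
    intro h
    simp [cpPositionsA, h t0 (by simp), ih (fun t ht => h t (by simp [ht]))]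

lemma cpWalk_mono : ∀ (rest : List (List Int)) (lo hi : Int),
    (cpWalkB rest lo hi).1 ≤ lo ∧ hi ≤ (cpWalkB rest lo hi).2 := by
  intro rest
  induction rest with
  | nil => intro lo hi; exact ⟨le_refl _, le_refl _⟩
  | cons hits t ih =>
    intro lo hi
    simp only [cpWalkB]
    split_ifs with h1 h2
    · obtain ⟨a, b⟩ := ih (cpNearestB hits hi) hi; exact ⟨by omega, b⟩
    · obtain ⟨a, b⟩ := ih lo (cpNearestB hits hi); exact ⟨a, by omega⟩
    · exact ih lo hi

lemma cpWalk_bounds : ∀ (rest : List (List Int)) (lo hi a b : Int),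
    (∀ l ∈ rest, l ≠ [] ∧ l.Pairwise (· < ·)) →
    (∀ l ∈ rest, ∀ p ∈ l, a ≤ p ∧ p ≤ b) →
    a ≤ lo → hi ≤ b →
    a ≤ (cpWalkB rest lo hi).1 ∧ (cpWalkB rest lo hi).2 ≤ b := by
  intro rest
  induction rest with
  | nil => intro lo hi a b _ _ h1 h2; exact ⟨h1, h2⟩
  | cons hits t ih =>
    intro lo hi a b hgood hbound h1 h2
    obtain ⟨hne, hs⟩ := hgood hits (by simp)
    have hc := hbound hits (by simp) (cpNearestB hits hi) (cpNearestB_mem hits hi hne hs)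
    have hgood' : ∀ l ∈ t, l ≠ [] ∧ l.Pairwise (· < ·) := fun l hl => hgood l (by simp [hl])
    have hbound' : ∀ l ∈ t, ∀ p ∈ l, a ≤ p ∧ p ≤ b := fun l hl => hbound l (by simp [hl])
    simp only [cpWalkB]
    split_ifs with hlt hgt
    · exact ih (cpNearestB hits hi) hi a b hgood' hbound' (by omega) h2
    · exact ih lo (cpNearestB hits hi) a b hgood' hbound' h1 (by omega)
    · exact ih lo hi a b hgood' hbound' h1 h2

lemma cpInner_walk (distance : Int) : ∀ (rest : List (List Int)),
    (∀ l ∈ rest, l ≠ [] ∧ l.Pairwise (· < ·)) →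
    ∀ lo hi, lo ≤ hi → hi - lo ≤ distance →
    cpInnerA distance rest lo hi
      = decide ((cpWalkB rest lo hi).2 - (cpWalkB rest lo hi).1 ≤ distance) := by
  intro rest
  induction rest with
  | nil =>
    intro _ lo hi _ hle
    simp [cpInnerA, cpWalkB, hle]
  | cons hits t ih =>
    intro hgood lo hi hlohi hle
    obtain ⟨hne, hs⟩ := hgood hits (by simp)
    have hgood' : ∀ l ∈ t, l ≠ [] ∧ l.Pairwise (· < ·) := fun l hl => hgood l (by simp [hl])
    simp only [cpInnerA, cpWalkB, cpNearestB_eq hits hi hne hs]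
    set c := (PySem.List.min? hits (fun pos => |pos - hi|)).getD 0 with hc
    have hmin : min lo c = if c < lo then c else lo := by rw [min_def]; split_ifs <;> omega
    have hmax : max hi c = if c > hi then c else hi := by rw [max_def]; split_ifs <;> omega
    split_ifs with hbig hlt hgt hlt hgt
    · -- span already > distance, A breaks: walk from (c, hi), final span still > distance
      obtain ⟨ha, hb⟩ := cpWalk_mono t c hi
      rw [hmin, if_pos hlt, hmax] at hbig
      have : ¬ ((cpWalkB t c hi).2 - (cpWalkB t c hi).1 ≤ distance) := by
        split_ifs at hbig <;> omega
      simp [this]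
    · obtain ⟨ha, hb⟩ := cpWalk_mono t lo c
      rw [hmin, if_neg hlt, hmax, if_pos hgt] at hbig
      have : ¬ ((cpWalkB t lo c).2 - (cpWalkB t lo c).1 ≤ distance) := by omega
      simp [this]
    · obtain ⟨ha, hb⟩ := cpWalk_mono t lo hi
      rw [hmin, if_neg hlt, hmax, if_neg hgt] at hbig
      omega
    · have hchi : ¬ c > hi := by omega
      rw [hmin, if_pos hlt, hmax, if_neg hchi] at hbig ⊢
      exact ih hgood' c hi (by omega) (by omega)
    · rw [hmin, if_neg hlt, hmax, if_pos hgt] at hbig ⊢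
      exact ih hgood' lo c (by omega) (by omega)
    · rw [hmin, if_neg hlt, hmax, if_neg hgt] at hbig ⊢
      exact ih hgood' lo hi hlohi (by omega)

lemma cpOuter_eq_any (distance : Int) (rest : List (List Int))
    (hgood : ∀ l ∈ rest, l ≠ [] ∧ l.Pairwise (· < ·)) (hd : 0 ≤ distance) :
    ∀ (first : List Int), cpOuterA distance rest first = cpAnyStartB distance rest first := by
  intro first
  induction first with
  | nil => rfl
  | cons s more ih =>
    simp only [cpOuterA, cpAnyStartB,
      cpInner_walk distance rest hgood s s (le_refl s) (by omega), decide_eq_true_eq]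
    split_ifs with h
    · rfl
    · exact ih

lemma cpOuter_neg (distance : Int) (rest : List (List Int))
    (hgood : ∀ l ∈ rest, l ≠ [] ∧ l.Pairwise (· < ·)) (hd : distance < 0)
    (hne : rest ≠ []) :
    ∀ (first : List Int), cpOuterA distance rest first = false
      ∧ cpAnyStartB distance rest first = false := by
  intro first
  induction first with
  | nil => exact ⟨rfl, rfl⟩
  | cons s more ih =>
    constructor
    · have hinner : cpInnerA distance rest s s = false := by
        cases rest with
        | nil => exact absurd rfl hne
        | cons hits t =>
          simp only [cpInnerA]
          split_ifs with hcond
          · rfl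
          · exfalso
            have h1 := le_max_left s ((PySem.List.min? hits fun pos => |pos - s|).getD 0)
            have h2 := min_le_left s ((PySem.List.min? hits fun pos => |pos - s|).getD 0)
            omega
      simp only [cpOuterA, hinner, if_neg (by simp : ¬ (false : Bool) = true)]
      exact ih.1
    · have hw : ¬ ((cpWalkB rest s s).2 - (cpWalkB rest s s).1 ≤ distance) := by
        obtain ⟨ha, hb⟩ := cpWalk_mono rest s s
        omega
      simp only [cpAnyStartB, if_neg hw]
      exact ih.2

lemma cpElem_between (l : List Int) (hne : l ≠ []) (hs : l.Pairwise (· < ·))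
    (p : Int) (hp : p ∈ l) :
    PySem.List.pyGetD l 0 0 ≤ p ∧ p ≤ PySem.List.pyGetD l (-1) 0 := by
  have hlen : 0 < l.length := List.length_pos_iff.mpr hne
  have hmono := List.pairwise_iff_getElem.mp hs
  obtain ⟨i, hi, he⟩ := List.mem_iff_getElem.mp hp
  have h0 : PySem.List.pyGetD l 0 0 = l[0] := by
    have := cpGetNat l 0 hlen; simpa using this
  rw [h0, cpGetNeg1 l hlen, ← he]
  constructor
  · rcases Nat.eq_zero_or_pos i with h | h
    · subst h; exact le_refl _
    · exact le_of_lt (hmono 0 i hlen hi h)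
  · rcases Nat.lt_or_ge i (l.length - 1) with h | h
    · exact le_of_lt (hmono i (l.length - 1) hi (by omega) h)
    · have : i = l.length - 1 := by omega
      subst this; exact le_refl _

lemma cpMinPos_le (positions : List (List Int)) (l : List Int) (hl : l ∈ positions) :
    (PySem.List.min? (positions.map (fun l => PySem.List.pyGetD l 0 0)) (fun v => v)).getD 0
      ≤ PySem.List.pyGetD l 0 0 := by
  have hmem : PySem.List.pyGetD l 0 0 ∈ positions.map (fun l => PySem.List.pyGetD l 0 0) :=
    List.mem_map_of_mem hl
  cases h : PySem.List.min? (positions.map (fun l => PySem.List.pyGetD l 0 0)) (fun v => v) with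
  | none =>
    rw [PySem.List.min?_eq_none_iff] at h
    rw [h] at hmem
    cases hmem
  | some m => simpa using PySem.List.min?_isMin h _ hmem

lemma cpMaxPos_ge (positions : List (List Int)) (l : List Int) (hl : l ∈ positions) :
    PySem.List.pyGetD l (-1) 0
      ≤ (PySem.List.max? (positions.map (fun l => PySem.List.pyGetD l (-1) 0)) (fun v => v)).getD 0 := by
  have hmem : PySem.List.pyGetD l (-1) 0 ∈ positions.map (fun l => PySem.List.pyGetD l (-1) 0) :=
    List.mem_map_of_mem hl
  cases h : PySem.List.max? (positions.map (fun l => PySem.List.pyGetD l (-1) 0)) (fun v => v) with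
  | none =>
    rw [PySem.List.max?_eq_none_iff] at h
    rw [h] at hmem; cases hmem
  | some m => simpa using PySem.List.max?_isMax h _ hmem

lemma cpMain (tokens : List String) (terms : List String) (distance : Int) :
    contains_proximity tokens terms distance = contains_proximity_alt tokens terms distance := by
  unfold contains_proximity contains_proximity_alt
  by_cases h0 : terms = []
  · simp [h0]
  · by_cases h1 : terms.length = 1
    · rw [if_pos (Or.inr h1), if_neg h0, if_neg h0, if_pos h1, cpIndexB_contains]
    · rw [if_neg (by tauto), if_neg h0, if_neg h1]
      have hmap : terms.map (fun term => (cpIndexB tokens).getD term [])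
          = terms.map (cpHitsA tokens) :=
        List.map_congr_left (fun t _ => cpIndexB_getD tokens t)
      rw [hmap]
      by_cases hemp : ∃ t ∈ terms, cpHitsA tokens t = []
      · rw [cpPositionsA_none tokens terms hemp]
        obtain ⟨t, ht, he⟩ := hemp
        have : (terms.map (cpHitsA tokens)).any (fun hits => hits.isEmpty) = true := by
          rw [List.any_eq_true]
          exact ⟨cpHitsA tokens t, List.mem_map_of_mem ht, by simp [he]⟩
        rw [if_pos this]
      · push Not at hemp
        rw [cpPositionsA_some tokens terms hemp]
        have hany : (terms.map (cpHitsA tokens)).any (fun hits => hits.isEmpty) = false := by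
          rw [List.any_eq_false]
          rintro l hl
          obtain ⟨t, ht, rfl⟩ := List.mem_map.mp hl
          simp [hemp t ht]
        rw [if_neg (by simp [hany])]
        have hgood : ∀ l ∈ terms.map (cpHitsA tokens), l ≠ [] ∧ l.Pairwise (· < ·) :=
          cpPositionsA_good tokens terms _ (cpPositionsA_some tokens terms hemp)
        cases hP : terms.map (cpHitsA tokens) with
        | nil => exact absurd (List.map_eq_nil_iff.mp hP) h0
        | cons first rest =>
          rw [hP] at hgood
          have hfne : first ≠ [] := (hgood first (by simp)).1
          have hrgood : ∀ l ∈ rest, l ≠ [] ∧ l.Pairwise (· < ·) :=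
            fun l hl => hgood l (by simp [hl])
          have hrne : rest ≠ [] := by
            have : terms.length = (first :: rest).length := by rw [← hP]; simp
            cases rest with
            | nil =>
              exfalso
              apply h1
              simpa using this
            | cons a b => simp
          simp only []
          split_ifs with hd
          · -- A's pre-pass fires: every start's walk stays inside [minPos, maxPos]
            cases hfc : first with
            | nil => exact absurd hfc hfne
            | cons s more =>
              set mn := (PySem.List.min? ((first :: rest).map
                (fun l => PySem.List.pyGetD l 0 0)) (fun v => v)).getD 0 with hmn
              set mx := (PySem.List.max? ((first :: rest).map
                (fun l => PySem.List.pyGetD l (-1) 0)) (fun v => v)).getD 0 with hmx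
              have hbound : ∀ l ∈ rest, ∀ p ∈ l, mn ≤ p ∧ p ≤ mx := by
                intro l hl p hp
                obtain ⟨hlne, hls⟩ := hrgood l hl
                obtain ⟨hlo, hhi⟩ := cpElem_between l hlne hls p hp
                have h1 := cpMinPos_le (first :: rest) l (by simp [hl])
                have h2 := cpMaxPos_ge (first :: rest) l (by simp [hl])
                constructor <;> omega
              have hs_in : mn ≤ s ∧ s ≤ mx := by
                obtain ⟨hfne2, hfs⟩ := hgood first (by simp)
                have hsm : s ∈ first := by rw [hfc]; simp
                obtain ⟨hlo, hhi⟩ := cpElem_between first hfne2 hfs s hsm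
                have h1 := cpMinPos_le (first :: rest) first (by simp)
                have h2 := cpMaxPos_ge (first :: rest) first (by simp)
                constructor <;> omega
              obtain ⟨hwa, hwb⟩ := cpWalk_bounds rest s s mn mx hrgood hbound hs_in.1 hs_in.2
              have : (cpWalkB rest s s).2 - (cpWalkB rest s s).1 ≤ distance := by omega
              simp [cpAnyStartB, this]
          · by_cases hneg : distance < 0
            · obtain ⟨ha, hb⟩ := cpOuter_neg distance rest hrgood hneg hrne first
              rw [ha, hb]
            · exact cpOuter_eq_any distance rest hrgood (by omega) first

-- ===== VERDICT (by name: the statement is the Claim_ definition above) =====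
theorem contains_proximity_spec : Claim_equal_contains_proximity := by
  intro tokens terms distance _
  unfold Spec_contains_proximity
  exact cpMain tokens terms distance
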